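-- pv_equiv track=rewrite | github.com/cassanof/CodeRM | codeprm/dataset/generate_mutated_dataset.py | get_reasoning_steps_indexed
-- ===== SOURCE A (Python) =====
-- from typing import Optional, List, Tuple
--
-- def get_reasoning_steps_indexed(code: str) -> List[Tuple[str, Tuple[int, int]]]:
--     lines = code.split('\n')
--     comments = []
--     current_comment = []
--     current_range_start = None
--     last_code_line = -1  # track the last line of code before a new comment
--
--     for index, line in enumerate(lines):
--         stripped_line = line.lstrip()
--         if stripped_line.startswith('#'):
--             if current_comment and current_range_start is not None:
--                 # append the current comment and the range from start to the last code line before this comment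
--                 comments.append((' '.join(current_comment),
--                                 (current_range_start, last_code_line)))
--                 current_comment = []
--                 current_range_start = None
--             # append line to the current comment block
--             comment_content = stripped_line[1:].strip()
--             current_comment.append(comment_content)
--         else:
--             if current_comment and current_range_start is None:
--                 # start new code range after current comment block
--                 current_range_start = index
--             last_code_line = index
--
--     if current_comment and current_range_start is not None:
--         # append the last comment block and range till the end of the file or the last code line
--         comments.append((' '.join(current_comment),
--                         (current_range_start, last_code_line)))
--     elif current_comment:
--         comments.append((' '.join(current_comment), (len(lines), len(lines))))
--
--     return comments
-- ===== SOURCE B (Python) =====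
-- from typing import List, Tuple
--
--
-- def _run_length(lines: List[str], flag: bool) -> int:
--     # length of the leading run of lines whose comment-ness equals flag
--     k = 0
--     while k < len(lines) and lines[k].lstrip().startswith('#') == flag:
--         k += 1
--     return k
--
--
-- def get_reasoning_steps_indexed(code: str) -> List[Tuple[str, Tuple[int, int]]]:
--     lines = code.split('\n')
--     n = len(lines)
--     # phase 1: cut the file into maximal consecutive runs; a comment run keeps its
--     # joined text, a code run its (first_line, last_line) span (blank lines are code)
--     runs = []
--     rest, idx = lines, 0
--     while rest:
--         flag = rest[0].lstrip().startswith('#')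
--         k = _run_length(rest, flag)
--         if flag:
--             runs.append(('com', ' '.join(l.lstrip()[1:].strip() for l in rest[:k])))
--         else:
--             runs.append(('code', (idx, idx + k - 1)))
--         rest, idx = rest[k:], idx + k
--     # phase 2: each comment run pairs with the next run's span; a trailing comment
--     # run (no code after it) gets (n, n)
--     out = []
--     for i, (kind, payload) in enumerate(runs):
--         if kind == 'com':
--             if i + 1 < len(runs) and runs[i + 1][0] == 'code':
--                 out.append((payload, runs[i + 1][1]))
--             else:
--                 out.append((payload, (n, n)))
--     return out
-- ===== Notes on version B (the rewrite author's own statement) =====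
-- stated objective: alternative
-- what changed: Replaces A's single-pass four-variable state machine (pending comment, range start, last code line) by a two-phase run decomposition: first cut the lines into maximal comment/code runs, then pair each comment run with the span of the following code run (or (n,n) at EOF).
import Mathlib
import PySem

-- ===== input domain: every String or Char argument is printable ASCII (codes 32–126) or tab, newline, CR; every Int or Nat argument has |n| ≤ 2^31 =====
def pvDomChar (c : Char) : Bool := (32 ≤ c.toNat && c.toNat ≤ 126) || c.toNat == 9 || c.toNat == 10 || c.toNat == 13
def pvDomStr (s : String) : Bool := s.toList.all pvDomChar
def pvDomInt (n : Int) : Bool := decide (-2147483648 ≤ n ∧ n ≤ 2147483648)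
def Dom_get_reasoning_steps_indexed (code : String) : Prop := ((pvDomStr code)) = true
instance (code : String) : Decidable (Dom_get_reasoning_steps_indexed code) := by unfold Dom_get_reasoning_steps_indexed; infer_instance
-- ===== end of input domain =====

-- B replaces A's single-pass four-variable comment/range state machine by a two-phase
-- run decomposition: cut the lines into maximal comment/code runs, then pair each comment
-- run with the following code span (alternative structure, same cost).


-- ===== PORT A =====
-- A's for-loop: state (comments, current_comment, current_range_start, last_code_line),
-- one line per step ('index' is enumerate's counter).
def pvALoop (ls : List String) (index : Int)
    (comments : List (String × (Int × Int))) (cc : List String)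
    (crs : Option Int) (lcl : Int) :
    List (String × (Int × Int)) × List String × Option Int × Int :=
  match ls with
  | [] => (comments, cc, crs, lcl)
  | line :: rest =>
    let stripped := PySem.Str.lstrip line
    if PySem.Str.startswith stripped "#" then
      let (comments', cc', crs') :=
        match crs with
        | some s =>
          if cc.isEmpty then (comments, cc, some s)
          else (comments ++ [(PySem.Str.join " " cc, (s, lcl))], ([] : List String), (none : Option Int))
        | none => (comments, cc, none)
      let content := PySem.Str.strip (PySem.Str.slice stripped (some 1) none)
      pvALoop rest (index + 1) comments' (cc' ++ [content]) crs' lcl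
    else
      let crs' := if !cc.isEmpty && crs.isNone then some index else crs
      pvALoop rest (index + 1) comments cc crs' index

-- A's code after the loop (the final two-branch flush)
def pvAFinal (n : Int)
    (st : List (String × (Int × Int)) × List String × Option Int × Int) :
    List (String × (Int × Int)) :=
  match st with
  | (comments, cc, crs, lcl) =>
    match crs with
    | some s => if cc.isEmpty then comments else comments ++ [(PySem.Str.join " " cc, (s, lcl))]
    | none => if cc.isEmpty then comments else comments ++ [(PySem.Str.join " " cc, (n, n))]

def get_reasoning_steps_indexed (code : String) : List (String × (Int × Int)) :=
  let lines := (PySem.Str.split? code "\n").getD []   -- sep "\n" ≠ "", so split? is never none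
  pvAFinal (lines.length : Int) (pvALoop lines 0 [] [] none (-1))

-- ===== PORT B =====
def pvIsComment (line : String) : Bool :=
  PySem.Str.startswith (PySem.Str.lstrip line) "#"

def pvContent (line : String) : String :=
  PySem.Str.strip (PySem.Str.slice (PySem.Str.lstrip line) (some 1) none)

-- Source B's _run_length while-loop as the obvious recursion over the same scan
def pvRunLength (lines : List String) (flag : Bool) : Nat :=
  match lines with
  | [] => 0
  | l :: rest => if pvIsComment l == flag then pvRunLength rest flag + 1 else 0

-- a run entry: Source B's ('com', text) / ('code', (a, b)) tuples
inductive PvRun where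
  | com (text : String)
  | code (a b : Int)
deriving DecidableEq, Repr

-- needed by pvRuns's termination proof (cited there), hence above the port
theorem pvRunLength_head_pos (l : String) (rest : List String) :
    0 < pvRunLength (l :: rest) (pvIsComment l) := by
  simp [pvRunLength]

-- Source B's phase-1 while loop: peel one maximal run per step
def pvRuns : List String → Int → List PvRun
  | [], _ => []
  | l :: rest, idx =>
    let k := pvRunLength (l :: rest) (pvIsComment l)
    (if pvIsComment l then
        PvRun.com (PySem.Str.join " " (((l :: rest).take k).map pvContent))
      else PvRun.code idx (idx + (k : Int) - 1))
      :: pvRuns ((l :: rest).drop k) (idx + (k : Int))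
  termination_by ls _ => ls.length
  decreasing_by
    have := pvRunLength_head_pos l rest
    simp only [List.length_drop, List.length_cons]
    omega

-- Source B's phase-2 loop: each comment run looks at the next run's kind and span;
-- the final com-com branch mirrors Source B's `runs[i+1][0] == 'code'` test (runs
-- alternate, so it is never reached)
def pvPair (n : Int) : List PvRun → List (String × (Int × Int))
  | [] => []
  | PvRun.code _ _ :: rest => pvPair n rest
  | [PvRun.com s] => [(s, (n, n))]
  | PvRun.com s :: PvRun.code a b :: rest => (s, (a, b)) :: pvPair n (PvRun.code a b :: rest)
  | PvRun.com s :: PvRun.com t :: rest => (s, (n, n)) :: pvPair n (PvRun.com t :: rest)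

def get_reasoning_steps_indexed_alt (code : String) : List (String × (Int × Int)) :=
  let lines := (PySem.Str.split? code "\n").getD []   -- sep "\n" ≠ "", so split? is never none
  pvPair (lines.length : Int) (pvRuns lines 0)

-- ===== PRECONDITION & SPEC =====
def Spec_get_reasoning_steps_indexed (code : String) (out : List (String × (Int × Int))) : Prop := out = get_reasoning_steps_indexed_alt code
instance (code : String) (out : List (String × (Int × Int))) : Decidable (Spec_get_reasoning_steps_indexed code out) := by unfold Spec_get_reasoning_steps_indexed; infer_instance

-- ===== CLAIM (what is proved, stated in full; the proofs are below) =====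
def Claim_equal_get_reasoning_steps_indexed : Prop := ∀ (code : String), Dom_get_reasoning_steps_indexed code → Spec_get_reasoning_steps_indexed code (get_reasoning_steps_indexed code)

-- ===== LEMMAS AND PROOFS =====

-- merging one pending comment block / code span into the head of a run list
def pvConsCom (cc : List String) (rs : List PvRun) : List PvRun :=
  match rs with
  | PvRun.com t :: r => PvRun.com (PySem.Str.join " " cc ++ " " ++ t) :: r
  | _ => PvRun.com (PySem.Str.join " " cc) :: rs

def pvConsCode (s lcl : Int) (rs : List PvRun) : List PvRun :=
  match rs with
  | PvRun.code _ b :: r => PvRun.code s b :: r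
  | _ => PvRun.code s lcl :: rs

theorem pvJoin_cons (a : String) (r : List String) :
    PySem.Str.join " " (a :: r) = if r = [] then a else a ++ " " ++ PySem.Str.join " " r := by
  cases r with
  | nil => simp [PySem.Str.join, PySem.Chars.join_singleton]
  | cons b t =>
    simp only [PySem.Str.join, List.map, PySem.Chars.join_cons_cons, if_neg (List.cons_ne_nil b t)]
    rw [String.ofList_append, String.ofList_append, String.ofList_toList]
    rfl

theorem pvJoin_snoc (cc : List String) (x : String) (h : cc ≠ []) :
    PySem.Str.join " " (cc ++ [x]) = PySem.Str.join " " cc ++ " " ++ x := by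
  induction cc with
  | nil => exact absurd rfl h
  | cons a t ih =>
    cases t with
    | nil => simp [pvJoin_cons]
    | cons b r =>
      rw [List.cons_append, pvJoin_cons, if_neg (by simp), ih (List.cons_ne_nil b r),
        pvJoin_cons a (b :: r), if_neg (List.cons_ne_nil b r)]
      simp [String.append_assoc]

theorem pvConsCom_consCom (cc : List String) (c : String) (rs : List PvRun) (h : cc ≠ []) :
    pvConsCom cc (pvConsCom [c] rs) = pvConsCom (cc ++ [c]) rs := by
  have h1 : PySem.Str.join " " [c] = c := by simp [pvJoin_cons]
  cases rs with
  | nil => simp [pvConsCom, h1, pvJoin_snoc cc c h]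
  | cons hd tl =>
    cases hd with
    | com t => simp [pvConsCom, h1, pvJoin_snoc cc c h, String.append_assoc]
    | code a b => simp [pvConsCom, h1, pvJoin_snoc cc c h]

theorem pvConsCode_consCode (s lcl i j : Int) (rs : List PvRun) :
    pvConsCode s lcl (pvConsCode i j rs) = pvConsCode s j rs := by
  cases rs with
  | nil => rfl
  | cons hd tl => cases hd <;> rfl

theorem pvConsCom_consCode (cc : List String) (s lcl : Int) (rs : List PvRun) :
    pvConsCom cc (pvConsCode s lcl rs) =
      PvRun.com (PySem.Str.join " " cc) :: pvConsCode s lcl rs := by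
  cases rs with
  | nil => rfl
  | cons hd tl => cases hd <;> rfl

theorem pvPair_consCode (n s lcl : Int) (rs : List PvRun) :
    pvPair n (pvConsCode s lcl rs) = pvPair n rs := by
  cases rs with
  | nil => rfl
  | cons hd tl =>
    cases hd with
    | com t =>
      cases tl with
      | nil => rfl
      | cons h2 t2 => cases h2 <;> rfl
    | code a b => rfl

theorem pvRunLength_cons_of_eq (l : String) (rest : List String) (flag : Bool)
    (h : pvIsComment l = flag) :
    pvRunLength (l :: rest) flag = pvRunLength rest flag + 1 := by
  simp [pvRunLength, h]

theorem pvRunLength_cons_of_ne (l : String) (rest : List String) (flag : Bool)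
    (h : pvIsComment l ≠ flag) :
    pvRunLength (l :: rest) flag = 0 := by
  simp [pvRunLength, h]

-- peeling one comment line off the front of the run decomposition
theorem pvRuns_cons_com (l : String) (rest : List String) (idx : Int)
    (hc : pvIsComment l = true) :
    pvRuns (l :: rest) idx = pvConsCom [pvContent l] (pvRuns rest (idx + 1)) := by
  have hj : PySem.Str.join " " [pvContent l] = pvContent l := by simp [pvJoin_cons]
  rw [pvRuns.eq_2, hc, if_pos rfl, pvRunLength_cons_of_eq l rest _ hc]
  cases rest with
  | nil =>
    rw [pvRunLength]
    simp [pvRuns.eq_1, pvConsCom, hj]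
  | cons m ms =>
    by_cases hm : pvIsComment m = true
    · rw [pvRuns.eq_2, hm, if_pos rfl, pvRunLength_cons_of_eq m ms _ hm]
      set k' := pvRunLength ms true with hk'
      have htake : List.take (k' + 1 + 1) (l :: m :: ms) = l :: List.take (k' + 1) (m :: ms) := by
        simp
      have hdrop : List.drop (k' + 1 + 1) (l :: m :: ms) = List.drop (k' + 1) (m :: ms) := by
        simp
      rw [htake, hdrop, List.map_cons, pvJoin_cons]
      have hne : (List.take (k' + 1) (m :: ms)).map pvContent ≠ [] := by
        simp
      rw [if_neg hne]
      simp only [pvConsCom, hj]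
      congr 2
      push_cast; ring
    · have hm' : pvIsComment m = false := by simpa using hm
      have hm0 : pvRunLength (m :: ms) true = 0 := pvRunLength_cons_of_ne m ms true hm
      rw [hm0, show List.take (0 + 1) (l :: m :: ms) = [l] from rfl,
        show List.drop (0 + 1) (l :: m :: ms) = m :: ms from rfl,
        show ((0 + 1 : Nat) : Int) = 1 by norm_num]
      rw [pvRuns.eq_2, hm', if_neg (by simp)]
      simp [pvConsCom, pvJoin_cons]

-- peeling one code line off the front of the run decomposition
theorem pvRuns_cons_code (l : String) (rest : List String) (idx : Int)
    (hc : pvIsComment l = false) :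
    pvRuns (l :: rest) idx = pvConsCode idx idx (pvRuns rest (idx + 1)) := by
  rw [pvRuns.eq_2, hc, if_neg (by simp), pvRunLength_cons_of_eq l rest _ hc]
  cases rest with
  | nil =>
    rw [pvRunLength]
    simp [pvRuns.eq_1, pvConsCode]
  | cons m ms =>
    by_cases hm : pvIsComment m = false
    · rw [pvRuns.eq_2, hm, if_neg (by simp), pvRunLength_cons_of_eq m ms _ hm]
      set k' := pvRunLength ms false with hk'
      have hdrop : List.drop (k' + 1 + 1) (l :: m :: ms) = List.drop (k' + 1) (m :: ms) := by
        simp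
      rw [hdrop]
      simp only [pvConsCode]
      congr 2
      · push_cast; ring
      · push_cast; ring_nf
    · have hm' : pvIsComment m = true := by simpa using hm
      have hm0 : pvRunLength (m :: ms) false = 0 :=
        pvRunLength_cons_of_ne m ms false (by simp [hm'])
      rw [hm0, show List.drop (0 + 1) (l :: m :: ms) = m :: ms from rfl,
        show ((0 + 1 : Nat) : Int) = 1 by norm_num]
      rw [pvRuns.eq_2, hm', if_pos rfl]
      simp [pvConsCode]

-- the loop invariant: A's state machine, started in any of its three reachable
-- state shapes, produces exactly B's pairing of the remaining runs
theorem pvMain (n : Int) (ls : List String) :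
    ∀ (idx : Int) (acc : List (String × (Int × Int))) (cc : List String) (lcl s : Int),
      (pvAFinal n (pvALoop ls idx acc [] none lcl) = acc ++ pvPair n (pvRuns ls idx)) ∧
      (cc ≠ [] → pvAFinal n (pvALoop ls idx acc cc none lcl)
        = acc ++ pvPair n (pvConsCom cc (pvRuns ls idx))) ∧
      (cc ≠ [] → pvAFinal n (pvALoop ls idx acc cc (some s) lcl)
        = acc ++ pvPair n (PvRun.com (PySem.Str.join " " cc) :: pvConsCode s lcl (pvRuns ls idx))) := by
  induction ls with
  | nil =>
    intro idx acc cc lcl s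
    refine ⟨?_, ?_, ?_⟩
    · simp [pvALoop, pvAFinal, pvRuns.eq_1, pvPair]
    · intro hcc
      simp [pvALoop, pvAFinal, pvRuns.eq_1, pvConsCom, pvPair, List.isEmpty_eq_false_iff.mpr hcc]
    · intro hcc
      simp [pvALoop, pvAFinal, pvRuns.eq_1, pvConsCode, pvPair, List.isEmpty_eq_false_iff.mpr hcc]
  | cons l rest ih =>
    intro idx acc cc lcl s
    have hfold : PySem.Str.strip (PySem.Str.slice (PySem.Str.lstrip l) (some 1) none)
        = pvContent l := rfl
    by_cases hc : pvIsComment l = true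
    · have hc' : PySem.Str.startswith (PySem.Str.lstrip l) "#" = true := hc
      refine ⟨?_, ?_, ?_⟩
      · rw [pvALoop, if_pos hc']
        simp only [List.nil_append, hfold]
        rw [(ih (idx + 1) acc [pvContent l] lcl s).2.1 (by simp),
          pvRuns_cons_com l rest idx hc]
      · intro hcc
        rw [pvALoop, if_pos hc']
        simp only [hfold]
        rw [(ih (idx + 1) acc (cc ++ [pvContent l]) lcl s).2.1 (by simp),
          pvRuns_cons_com l rest idx hc, pvConsCom_consCom _ _ _ hcc]
      · intro hcc
        rw [pvALoop, if_pos hc']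
        simp only [List.isEmpty_eq_false_iff.mpr hcc, Bool.false_eq_true, if_false,
          List.nil_append, hfold]
        rw [(ih (idx + 1) (acc ++ [(PySem.Str.join " " cc, (s, lcl))]) [pvContent l] lcl s).2.1
          (by simp), pvRuns_cons_com l rest idx hc]
        obtain ⟨t, r, hr⟩ : ∃ t r, pvRuns (l :: rest) idx = PvRun.com t :: r := by
          rw [pvRuns.eq_2, hc, if_pos rfl]; exact ⟨_, _, rfl⟩
        rw [← pvRuns_cons_com l rest idx hc, hr]
        simp [pvConsCode, pvPair, List.append_assoc]
    · have hc' : PySem.Str.startswith (PySem.Str.lstrip l) "#" = false := by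
        simpa [pvIsComment] using hc
      have hcf : pvIsComment l = false := by simpa using hc
      refine ⟨?_, ?_, ?_⟩
      · rw [pvALoop, if_neg (by rw [hc']; simp)]
        simp only [List.isEmpty_nil, Bool.not_true, Bool.false_and,
          if_neg (by simp : ¬((false : Bool) = true))]
        rw [(ih (idx + 1) acc cc idx s).1, pvRuns_cons_code l rest idx hcf, pvPair_consCode]
      · intro hcc
        rw [pvALoop, if_neg (by rw [hc']; simp)]
        simp only [List.isEmpty_eq_false_iff.mpr hcc, Option.isNone_none, Bool.not_false,
          Bool.and_true]
        rw [if_pos trivial]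
        rw [(ih (idx + 1) acc cc idx idx).2.2 hcc, pvRuns_cons_code l rest idx hcf,
          pvConsCom_consCode]
      · intro hcc
        rw [pvALoop, if_neg (by rw [hc']; simp)]
        simp only [List.isEmpty_eq_false_iff.mpr hcc, Option.isNone_some, Bool.and_false,
          if_neg (by simp : ¬((false : Bool) = true))]
        rw [(ih (idx + 1) acc cc idx s).2.2 hcc, pvRuns_cons_code l rest idx hcf,
          pvConsCode_consCode]

-- ===== VERDICT (by name: the statement is the Claim_ definition above) =====
theorem get_reasoning_steps_indexed_spec : Claim_equal_get_reasoning_steps_indexed := by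
  intro code _
  unfold Spec_get_reasoning_steps_indexed get_reasoning_steps_indexed get_reasoning_steps_indexed_alt
  exact (pvMain _ _ 0 [] [] (-1) 0).1
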